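-- pv_equiv track=rewrite | github.com/DuskPiper/Code-Puzzle-Diary | LeetCode 756 Pyramid Transition Matrix.py | pyramidTransition
-- ===== SOURCE A (Python) =====
-- def pyramidTransition(bottom, allowed):
--     """
--     :type bottom: str
--     :type allowed: List[str]
--     :rtype: bool
--     """
--     get_head = {} # 哈希字典，用于从三角的两个脚快速查可能的顶点
--     for triple in allowed: # 初始化字典
--         if triple[:2] not in get_head: get_head[triple[:2]] = [triple[2]]
--         else: get_head[triple[:2]].append(triple[2])
--
--     def cur_layer_construct(floor): # 递归
--         if len(floor) <= 1: return True # 堆叠到顶则回True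
--         possible_ceilings = [""] # 本层所有可能的天花板（上一层的地板），这个list的元素长度会从左到右逐渐长长
--         for ptr in range(len(floor) - 1): # 从左到右根据地板铺天花板，每步铺一块天花板，天花板最终位数比地板少一位
--             last_ceilings = list(possible_ceilings) # 上次循环的可能天花板，这次作为基础、往右修一块砖
--             possible_ceilings = set([]) # 本次往右修好了一块砖的天花板的所有可能
--             for head in get_head.get(floor[ptr] + floor[ptr + 1], []): # 本次往右修一块的所有可能性
--                 possible_ceilings.update([former + head for former in last_ceilings]) # 右边的list是上次所有可能性append本次本种可能的砖
--             if not possible_ceilings: return False # 本次往右没可能修了那就返回False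
--         for ceiling in possible_ceilings: # DFS，逻辑上是any(recursion for ceiling)，但直接这样写是BFS，费运行时间
--             if cur_layer_construct(ceiling): return True
--         return False
--
--     return cur_layer_construct(bottom)
-- ===== SOURCE B (Python) =====
-- def pyramidTransition(bottom, allowed):
--     heads = {}
--     for t in allowed:
--         heads.setdefault(t[:2], []).append(t[2])
--
--     def solve(floor):
--         if len(floor) <= 1:
--             return True
--         def build(pos, ceiling):
--             if pos == len(floor) - 1:
--                 return solve(ceiling)
--             for h in heads.get(floor[pos:pos + 2], []):
--                 if build(pos + 1, ceiling + h):
--                     return True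
--             return False
--         return build(0, "")
--
--     return solve(bottom)
-- ===== Notes on version B (the rewrite author's own statement) =====
-- stated objective: alternative
-- what changed: Instead of materializing, layer by layer, the whole set of possible ceilings before recursing (A's per-layer breadth-first set construction), B does a cell-by-cell backtracking DFS that recurses to the next layer as soon as one complete ceiling is found, never building the set of all ceilings.
import Mathlib
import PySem

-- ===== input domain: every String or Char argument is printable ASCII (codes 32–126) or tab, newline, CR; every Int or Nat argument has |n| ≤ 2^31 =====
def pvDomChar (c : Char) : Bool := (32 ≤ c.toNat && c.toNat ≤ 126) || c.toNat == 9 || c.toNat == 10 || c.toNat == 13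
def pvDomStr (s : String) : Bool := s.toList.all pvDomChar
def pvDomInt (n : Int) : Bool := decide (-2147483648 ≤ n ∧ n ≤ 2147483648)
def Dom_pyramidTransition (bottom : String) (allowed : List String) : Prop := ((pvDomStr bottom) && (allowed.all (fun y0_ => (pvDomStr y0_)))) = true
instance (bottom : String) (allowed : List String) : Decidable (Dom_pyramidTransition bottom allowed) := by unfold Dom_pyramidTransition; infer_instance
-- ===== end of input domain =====

-- B replaces A's per-layer materialization of the full set of possible ceilings by a
-- cell-by-cell backtracking DFS (same return value; neither argument is mutated).
-- Both ports work on List Char (str ≅ List Char, PySem string ops are defined on it).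

-- ===== PORT A =====
-- floor[ptr] + floor[ptr + 1]: both indices are in range at every use (ptr ≤ len-2), so getD is exact.
def pvKeyA (floor : List Char) (i : Nat) : List Char := [floor.getD i ' ', floor.getD (i + 1) ' ']

-- get_head: 'if triple[:2] not in get_head: get_head[triple[:2]] = [triple[2]] else: append'.
-- triple[2] raises IndexError when len(triple) < 3 — those inputs are excluded by Pre_;
-- the getD default there is never relied on inside Pre_.
def pvHeadsA (allowed : List String) : PySem.Dict (List Char) (List Char) :=
  allowed.foldl
    (fun d triple =>
      let k := triple.toList.take 2            -- triple[:2] (nonnegative slice = take)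
      let v := triple.toList.getD 2 ' '        -- triple[2]
      if PySem.Dict.contains d k = false then PySem.Dict.insert d k [v]
      else PySem.Dict.modify d k [] (fun l => l ++ [v]))
    PySem.Dict.empty

-- one step of 'for ptr in range(len(floor) - 1)'; the state is 'none' once the loop has
-- hit 'return False' (which then propagates), otherwise 'some possible_ceilings'.
def pvStepA (H : PySem.Dict (List Char) (List Char)) (floor : List Char)
    (st : Option (List (List Char))) (ptr : Nat) : Option (List (List Char)) :=
  match st with
  | none => none
  | some last =>                               -- last_ceilings = list(possible_ceilings)
    let poss : PySem.Set (List Char) :=        -- possible_ceilings = set([]); update(...) per head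
      (PySem.Dict.getD H (pvKeyA floor ptr) []).foldl
        (fun s h => PySem.Set.update s (last.map (fun former => former ++ [h])))
        PySem.Set.empty
    if poss = [] then none else some poss      -- 'if not possible_ceilings: return False'

-- cur_layer_construct; fuel is only a totality guard (each recursive call is on a floor one
-- shorter and the top-level call passes bottom.length + 1, so the fuel never runs out).
-- range(len(floor)-1) has the same (nonnegative) elements as List.range (len-1).
def pvCurA (H : PySem.Dict (List Char) (List Char)) : Nat → List Char → Bool
  | 0, _ => false
  | fuel + 1, floor =>
    if floor.length ≤ 1 then true
    else
      match (List.range (floor.length - 1)).foldl (pvStepA H floor) (some [[]]) with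
      | none => false
      | some cs => cs.any (fun c => pvCurA H fuel c)   -- 'for ceiling in possible_ceilings: if rec: return True'

def pyramidTransition (bottom : String) (allowed : List String) : Bool :=
  pvCurA (pvHeadsA allowed) (bottom.toList.length + 1) bottom.toList

-- ===== PORT B =====
-- floor[pos:pos+2]
def pvKeyB (floor : List Char) (pos : Nat) : List Char :=
  PySem.List.slice floor (some (pos : Int)) (some ((pos : Int) + 2))

-- heads.setdefault(t[:2], []).append(t[2])
def pvHeadsB (allowed : List String) : PySem.Dict (List Char) (List Char) :=
  allowed.foldl
    (fun d t =>
      let k := t.toList.take 2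
      PySem.Dict.modify (PySem.Dict.setdefault d k []) k [] (fun l => l ++ [t.toList.getD 2 ' ']))
    PySem.Dict.empty

-- solve / build; fuel is only a totality guard as in port A.  build carries
-- rem = len(floor) - 1 - pos, so Python's 'pos == len(floor) - 1' test is 'rem = 0'.
mutual
def pvSolveB (H : PySem.Dict (List Char) (List Char)) : Nat → List Char → Bool
  | 0, _ => false
  | fuel + 1, floor =>
    if floor.length ≤ 1 then true
    else pvBuildB H fuel floor (floor.length - 1) 0 []
termination_by fuel _ => ((fuel : Nat), 0)

def pvBuildB (H : PySem.Dict (List Char) (List Char)) : Nat → List Char → Nat → Nat → List Char → Bool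
  | fuel, _floor, 0, _pos, ceiling => pvSolveB H fuel ceiling
  | fuel, floor, rem + 1, pos, ceiling =>
    (PySem.Dict.getD H (pvKeyB floor pos) []).any
      (fun h => pvBuildB H fuel floor rem (pos + 1) (ceiling ++ [h]))   -- 'if build(pos+1, ceiling+h): return True'
termination_by fuel _ rem _ _ => ((fuel : Nat), rem + 1)
end

def pyramidTransition_alt (bottom : String) (allowed : List String) : Bool :=
  pvSolveB (pvHeadsB allowed) (bottom.toList.length + 1) bottom.toList

-- ===== PRECONDITION & SPEC =====
-- A (and B) raise IndexError on triple[2] when some allowed triple has fewer than 3 characters;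
-- only those crashing inputs are excluded.
def Pre_pyramidTransition (bottom : String) (allowed : List String) : Prop :=
  ∀ t ∈ allowed, 3 ≤ t.toList.length
instance (bottom : String) (allowed : List String) : Decidable (Pre_pyramidTransition bottom allowed) := by unfold Pre_pyramidTransition; infer_instance
def pvWitness_pyramidTransition : String × List String := ("AB", ["ABC"])

def Spec_pyramidTransition (bottom : String) (allowed : List String) (out : Bool) : Prop := out = pyramidTransition_alt bottom allowed
instance (bottom : String) (allowed : List String) (out : Bool) : Decidable (Spec_pyramidTransition bottom allowed out) := by unfold Spec_pyramidTransition; infer_instance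

-- ===== CLAIM (what is proved, stated in full; the proofs are below) =====
def Claim_equal_pyramidTransition : Prop := ∀ (bottom : String) (allowed : List String), Dom_pyramidTransition bottom allowed → Pre_pyramidTransition bottom allowed → Spec_pyramidTransition bottom allowed (pyramidTransition bottom allowed)

-- ===== LEMMAS AND PROOFS =====

-- 'c is a valid ceiling prefix of length k over floor' (keys in A's index-pair form)
def pvQk (H : PySem.Dict (List Char) (List Char)) (floor : List Char) (k : Nat) (c : List Char) : Prop :=
  c.length = k ∧ ∀ i, i < k → c.getD i ' ' ∈ PySem.Dict.getD H (pvKeyA floor i) []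

-- 'ext is a valid ceiling segment of length rem starting at position pos' (keys in B's slice form)
def pvQB (H : PySem.Dict (List Char) (List Char)) (floor : List Char) (pos rem : Nat) (ext : List Char) : Prop :=
  ext.length = rem ∧ ∀ i, i < rem → ext.getD i ' ' ∈ PySem.Dict.getD H (pvKeyB floor (pos + i)) []

theorem pvHeadsStep_eq (d : PySem.Dict (List Char) (List Char)) (t : String) :
    (let k := t.toList.take 2
     let v := t.toList.getD 2 ' '
     if PySem.Dict.contains d k = false then PySem.Dict.insert d k [v]
     else PySem.Dict.modify d k [] (fun l => l ++ [v])) =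
    (let k := t.toList.take 2
     PySem.Dict.modify (PySem.Dict.setdefault d k []) k [] (fun l => l ++ [t.toList.getD 2 ' '])) := by
  set k := t.toList.take 2
  by_cases hc : PySem.Dict.contains d k = true
  · simp only [hc, PySem.Dict.setdefault_of_contains d _ hc]
    simp
  · have hc' : PySem.Dict.contains d k = false := by simpa using hc
    simp only [hc']
    rw [PySem.Dict.setdefault_of_not_contains d _ hc']
    simp only [PySem.Dict.modify, PySem.Dict.getD_insert_self, PySem.Dict.insert_insert_self]
    simp

theorem pvHeads_eq (allowed : List String) : pvHeadsA allowed = pvHeadsB allowed := by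
  unfold pvHeadsA pvHeadsB
  induction allowed using List.reverseRecOn with
  | nil => rfl
  | append_singleton l t ih =>
    simp only [List.foldl_append, List.foldl_cons, List.foldl_nil, pvHeadsStep_eq]

theorem pvKey_eq (floor : List Char) (i : Nat) (h : i + 1 < floor.length) :
    pvKeyB floor i = pvKeyA floor i := by
  unfold pvKeyB pvKeyA
  have h2 : ((i : Int) + 2) = ((i : Int) + ((2 : Nat) : Int)) := by push_cast; ring
  rw [h2, PySem.List.slice_natCast_add]
  have h1 : List.drop i floor = floor[i] :: List.drop (i + 1) floor :=
    (List.getElem_cons_drop (by omega)).symm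
  have h2' : List.drop (i + 1) floor = floor[i + 1] :: List.drop (i + 2) floor :=
    (List.getElem_cons_drop h).symm
  rw [List.getD_eq_getElem _ _ (by omega : i < floor.length), List.getD_eq_getElem _ _ h, h1, h2']
  rfl

theorem pvQk_append (H : PySem.Dict (List Char) (List Char)) (floor : List Char) (k : Nat)
    (f : List Char) (hd : Char) :
    pvQk H floor (k + 1) (f ++ [hd]) ↔
      pvQk H floor k f ∧ hd ∈ PySem.Dict.getD H (pvKeyA floor k) [] := by
  have hlt : ∀ i, i < f.length → (f ++ [hd]).getD i ' ' = f.getD i ' ' := by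
    intro i hi
    simp [List.getD_eq_getElem?_getD, List.getElem?_append_left hi]
  have hlast : (f ++ [hd]).getD f.length ' ' = hd := by
    simp [List.getD_eq_getElem?_getD]
  unfold pvQk
  constructor
  · rintro ⟨hlen, hall⟩
    have hfl : f.length = k := by simpa using hlen
    subst hfl
    refine ⟨⟨rfl, fun i hi => ?_⟩, ?_⟩
    · have := hall i (by omega)
      rwa [hlt i (by omega)] at this
    · have := hall f.length (by omega)
      rwa [hlast] at this
  · rintro ⟨⟨hfl, hall⟩, hm⟩
    subst hfl
    refine ⟨by simp, fun i hi => ?_⟩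
    rcases Nat.lt_or_ge i f.length with hik | hik
    · rw [hlt i (by omega)]
      exact hall i hik
    · have hik' : i = f.length := by omega
      subst hik'
      rwa [hlast]

theorem pvQk_snoc (H : PySem.Dict (List Char) (List Char)) (floor : List Char) (k : Nat)
    (c : List Char) :
    pvQk H floor (k + 1) c ↔
      ∃ f hd, c = f ++ [hd] ∧ pvQk H floor k f ∧ hd ∈ PySem.Dict.getD H (pvKeyA floor k) [] := by
  constructor
  · intro hc
    rcases List.eq_nil_or_concat c with rfl | ⟨f, hd, hcc⟩
    · exact absurd hc.1 (by simp)
    · simp only [List.concat_eq_append] at hcc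
      subst hcc
      exact ⟨f, hd, rfl, (pvQk_append H floor k f hd).mp hc⟩
  · rintro ⟨f, hd, rfl, hq, hm⟩
    exact (pvQk_append H floor k f hd).mpr ⟨hq, hm⟩

theorem pvMem_foldl_update (hs : List Char) (last : List (List Char)) (s0 : PySem.Set (List Char)) (x : List Char) :
    x ∈ hs.foldl (fun s h => PySem.Set.update s (last.map (fun former => former ++ [h]))) s0 ↔
      x ∈ s0 ∨ ∃ h ∈ hs, ∃ f ∈ last, x = f ++ [h] := by
  induction hs generalizing s0 with
  | nil => simp
  | cons h t ih =>
    simp only [List.foldl_cons, ih, PySem.Set.mem_update, List.mem_map, List.mem_cons]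
    constructor
    · rintro ((hx | ⟨f, hf, rfl⟩) | ⟨h', hh', f, hf, rfl⟩)
      · exact Or.inl hx
      · exact Or.inr ⟨h, Or.inl rfl, f, hf, rfl⟩
      · exact Or.inr ⟨h', Or.inr hh', f, hf, rfl⟩
    · rintro (hx | ⟨h', (rfl | hh'), f, hf, rfl⟩)
      · exact Or.inl (Or.inl hx)
      · exact Or.inl (Or.inr ⟨f, hf, rfl⟩)
      · exact Or.inr ⟨h', hh', f, hf, rfl⟩

theorem pvLoopA_char (H : PySem.Dict (List Char) (List Char)) (floor : List Char) (m : Nat) :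
    ((List.range m).foldl (pvStepA H floor) (some [[]]) = none → ∀ x, ¬ pvQk H floor m x) ∧
    (∀ cs, (List.range m).foldl (pvStepA H floor) (some [[]]) = some cs →
      ∀ x, (x ∈ cs ↔ pvQk H floor m x)) := by
  induction m with
  | zero =>
    constructor
    · intro h
      simp at h
    · intro cs hcs x
      simp only [List.range_zero, List.foldl_nil, Option.some.injEq] at hcs
      subst hcs
      simp only [List.mem_singleton]
      unfold pvQk
      constructor
      · rintro rfl
        exact ⟨rfl, fun i hi => absurd hi (by omega)⟩
      · rintro ⟨hlen, -⟩
        exact List.length_eq_zero_iff.mp hlen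
  | succ m ih =>
    rw [List.range_succ]
    simp only [List.foldl_append, List.foldl_cons, List.foldl_nil]
    rcases hprev : (List.range m).foldl (pvStepA H floor) (some [[]]) with _ | cs
    · simp only [pvStepA]
      constructor
      · intro _ x hx
        obtain ⟨f, hd, rfl, hq, -⟩ := (pvQk_snoc H floor m x).mp hx
        exact ih.1 hprev f hq
      · intro cs hcs
        simp at hcs
    · have hmem : ∀ x, (x ∈ (PySem.Dict.getD H (pvKeyA floor m) []).foldl
          (fun s h => PySem.Set.update s (cs.map (fun former => former ++ [h])))
          PySem.Set.empty ↔ pvQk H floor (m + 1) x) := by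
        intro x
        rw [pvMem_foldl_update, pvQk_snoc H floor m x]
        constructor
        · rintro (hx | ⟨h, hh, f, hf, rfl⟩)
          · exact absurd hx (by simp [PySem.Set.empty])
          · exact ⟨f, h, rfl, (ih.2 cs hprev f).mp hf, hh⟩
        · rintro ⟨f, hd, rfl, hq, hm⟩
          exact Or.inr ⟨hd, hm, f, (ih.2 cs hprev f).mpr hq, rfl⟩
      simp only [pvStepA]
      by_cases hP : (PySem.Dict.getD H (pvKeyA floor m) []).foldl
          (fun s h => PySem.Set.update s (cs.map (fun former => former ++ [h])))
          PySem.Set.empty = []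
      · simp only [hP]
        constructor
        · intro _ x hx
          have := (hmem x).mpr hx
          rw [hP] at this
          simp at this
        · intro cs' hcs'
          simp at hcs'
      · simp only [if_neg hP]
        constructor
        · intro h
          simp at h
        · intro cs' hcs' x
          have hcs'' : cs' = (PySem.Dict.getD H (pvKeyA floor m) []).foldl
              (fun s h => PySem.Set.update s (cs.map (fun former => former ++ [h])))
              PySem.Set.empty := by
            simpa using hcs'.symm
          rw [hcs'']
          exact hmem x

theorem pvCurA_succ_iff (H : PySem.Dict (List Char) (List Char)) (fuel : Nat) (floor : List Char) :
    pvCurA H (fuel + 1) floor = true ↔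
      (floor.length ≤ 1 ∨ ∃ c, pvQk H floor (floor.length - 1) c ∧ pvCurA H fuel c = true) := by
  by_cases hl : floor.length ≤ 1
  · simp [pvCurA, hl]
  · simp only [pvCurA, if_neg hl]
    rcases hfold : (List.range (floor.length - 1)).foldl (pvStepA H floor) (some [[]]) with _ | cs
    · simp only []
      constructor
      · intro h
        simp at h
      · rintro (h | ⟨c, hq, -⟩)
        · exact absurd h hl
        · exact absurd hq ((pvLoopA_char H floor (floor.length - 1)).1 hfold c)
    · simp only [List.any_eq_true]
      constructor
      · rintro ⟨c, hc, hrec⟩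
        exact Or.inr ⟨c, ((pvLoopA_char H floor (floor.length - 1)).2 cs hfold c).mp hc, hrec⟩
      · rintro (h | ⟨c, hq, hrec⟩)
        · exact absurd h hl
        · exact ⟨c, ((pvLoopA_char H floor (floor.length - 1)).2 cs hfold c).mpr hq, hrec⟩

theorem pvQB_cons (H : PySem.Dict (List Char) (List Char)) (floor : List Char) (pos rem : Nat)
    (h : Char) (ext : List Char) :
    pvQB H floor pos (rem + 1) (h :: ext) ↔
      h ∈ PySem.Dict.getD H (pvKeyB floor pos) [] ∧ pvQB H floor (pos + 1) rem ext := by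
  unfold pvQB
  constructor
  · rintro ⟨hlen, hall⟩
    refine ⟨by simpa using hall 0 (by omega), by simpa using hlen, fun i hi => ?_⟩
    have := hall (i + 1) (by omega)
    simp only [List.getD_cons_succ] at this
    have harith : pos + (i + 1) = pos + 1 + i := by omega
    rwa [harith] at this
  · rintro ⟨hh, hlen, hall⟩
    refine ⟨by simpa using hlen, fun i hi => ?_⟩
    cases i with
    | zero => simpa using hh
    | succ j =>
      simp only [List.getD_cons_succ]
      have harith : pos + (j + 1) = pos + 1 + j := by omega
      rw [harith]
      exact hall j (by omega)

theorem pvBuildB_iff (H : PySem.Dict (List Char) (List Char)) (fuel : Nat) (floor : List Char)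
    (rem : Nat) : ∀ (pos : Nat) (ceiling : List Char),
    pvBuildB H fuel floor rem pos ceiling = true ↔
      ∃ ext, pvQB H floor pos rem ext ∧ pvSolveB H fuel (ceiling ++ ext) = true := by
  induction rem with
  | zero =>
    intro pos ceiling
    simp only [pvBuildB]
    constructor
    · intro hs
      exact ⟨[], ⟨rfl, fun i hi => absurd hi (by omega)⟩, by simpa using hs⟩
    · rintro ⟨ext, ⟨hlen, -⟩, hs⟩
      have : ext = [] := List.length_eq_zero_iff.mp hlen
      subst this
      simpa using hs
  | succ rem ih =>
    intro pos ceiling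
    simp only [pvBuildB, List.any_eq_true]
    constructor
    · rintro ⟨h, hh, hb⟩
      rw [ih] at hb
      obtain ⟨ext, hq, hs⟩ := hb
      refine ⟨h :: ext, (pvQB_cons H floor pos rem h ext).mpr ⟨hh, hq⟩, ?_⟩
      rw [List.append_cons]
      exact hs
    · rintro ⟨ext, hq, hs⟩
      obtain ⟨h, ext', rfl⟩ : ∃ h ext', ext = h :: ext' := by
        cases ext with
        | nil => exact absurd hq.1 (by simp)
        | cons a l => exact ⟨a, l, rfl⟩
      obtain ⟨hh, hq'⟩ := (pvQB_cons H floor pos rem h ext').mp hq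
      refine ⟨h, hh, (ih _ _).mpr ⟨ext', hq', ?_⟩⟩
      rw [← List.append_cons]
      exact hs

theorem pvSolveB_succ_iff (H : PySem.Dict (List Char) (List Char)) (fuel : Nat) (floor : List Char) :
    pvSolveB H (fuel + 1) floor = true ↔
      (floor.length ≤ 1 ∨ ∃ c, pvQk H floor (floor.length - 1) c ∧ pvSolveB H fuel c = true) := by
  by_cases hl : floor.length ≤ 1
  · simp [pvSolveB, hl]
  · simp only [pvSolveB, if_neg hl]
    rw [pvBuildB_iff]
    simp only [List.nil_append]
    constructor
    · rintro ⟨ext, ⟨hlen, hall⟩, hs⟩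
      refine Or.inr ⟨ext, ⟨hlen, fun i hi => ?_⟩, hs⟩
      rw [← pvKey_eq floor i (by omega)]
      have := hall i hi
      rwa [Nat.zero_add] at this
    · rintro (h | ⟨c, ⟨hlen, hall⟩, hs⟩)
      · exact absurd h hl
      · refine ⟨c, ⟨hlen, fun i hi => ?_⟩, hs⟩
        rw [Nat.zero_add, pvKey_eq floor i (by omega)]
        exact hall i hi

theorem pvMain (H : PySem.Dict (List Char) (List Char)) (fuel : Nat) (floor : List Char) :
    pvCurA H fuel floor = pvSolveB H fuel floor := by
  induction fuel generalizing floor with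
  | zero => simp [pvCurA, pvSolveB]
  | succ fuel ih =>
    rw [Bool.eq_iff_iff, pvCurA_succ_iff, pvSolveB_succ_iff]
    simp only [ih]

-- ===== VERDICT (by name: the statement is the Claim_ definition above) =====
theorem pyramidTransition_spec : Claim_equal_pyramidTransition := by
  intro bottom allowed _dom _pre
  unfold Spec_pyramidTransition pyramidTransition pyramidTransition_alt
  rw [pvHeads_eq]
  exact pvMain _ _ _
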